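-- pv_equiv track=rewrite | github.com/JoeyLai1234/mini_pupper_ros | mini_pupper_recognition/mini_pupper_recognition/ai_face_recognition_node.py | extract_keyword_constant
-- ===== SOURCE A (Python) =====
-- def extract_keyword_constant(input_string):
--     input_string = input_string.strip()
--     parts = input_string.split()
--
--     condition = ""
--     singer = ""
--     dancer = ""
--     name = ""
--
--     for part in parts:
--         if part.lower() in ['yes', 'no']:
--             condition = part.lower()
--         elif part.lower() in ['singer', 'not_singer']:
--             singer = part.lower()
--         elif part.lower() in ['dancer', 'not_dancer']:
--             dancer = part
--         else:
--             name = part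
--
--     return condition, singer, dancer, name
-- ===== SOURCE B (Python) =====
-- _COND = {'yes', 'no'}
-- _SINGER = {'singer', 'not_singer'}
-- _DANCER = {'dancer', 'not_dancer'}
--
--
-- def extract_keyword_constant(input_string):
--     parts = input_string.strip().split()
--     condition = next((p.lower() for p in reversed(parts) if p.lower() in _COND), "")
--     singer = next((p.lower() for p in reversed(parts) if p.lower() in _SINGER), "")
--     dancer = next((p for p in reversed(parts) if p.lower() in _DANCER), "")
--     name = next((p for p in reversed(parts)
--                  if p.lower() not in _COND
--                  and p.lower() not in _SINGER
--                  and p.lower() not in _DANCER), "")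
--     return condition, singer, dancer, name
-- ===== Notes on version B (the rewrite author's own statement) =====
-- stated objective: alternative
-- what changed: Replaces A's single stateful classification loop with four independent reversed scans, each taking the last token of its category (name = last non-keyword token) via next(...) with an empty-string default.
import Mathlib
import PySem

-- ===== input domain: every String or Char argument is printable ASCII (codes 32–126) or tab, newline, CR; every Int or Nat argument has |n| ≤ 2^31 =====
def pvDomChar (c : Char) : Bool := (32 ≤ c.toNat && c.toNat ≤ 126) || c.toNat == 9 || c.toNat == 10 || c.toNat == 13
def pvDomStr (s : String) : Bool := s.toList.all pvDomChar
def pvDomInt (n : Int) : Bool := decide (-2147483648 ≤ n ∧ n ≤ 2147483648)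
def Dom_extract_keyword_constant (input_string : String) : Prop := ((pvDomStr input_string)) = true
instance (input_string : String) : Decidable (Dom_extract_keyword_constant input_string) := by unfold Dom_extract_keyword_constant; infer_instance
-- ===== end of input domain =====

-- B replaces A's single stateful classification loop by four independent reversed scans
-- (objective: alternative decomposition, same cost); return values proved equal on Dom.

-- ===== PORT A =====
-- one pass, last write to each field wins (transliteration of A's for-loop)
def pvStepA (st : String × String × String × String) (part : String) :
    String × String × String × String :=
  let lp := PySem.Str.lower part
  if lp == "yes" || lp == "no" then (lp, st.2.1, st.2.2.1, st.2.2.2)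
  else if lp == "singer" || lp == "not_singer" then (st.1, lp, st.2.2.1, st.2.2.2)
  else if lp == "dancer" || lp == "not_dancer" then (st.1, st.2.1, part, st.2.2.2)
  else (st.1, st.2.1, st.2.2.1, part)

def extract_keyword_constant (input_string : String) : String × String × String × String :=
  let parts := PySem.Str.split₀ (PySem.Str.strip input_string)
  parts.foldl pvStepA ("", "", "", "")

-- ===== PORT B =====
-- category tests (membership of p.lower() in the keyword sets)
def pvHitCond (p : String) : Bool :=
  PySem.Str.lower p == "yes" || PySem.Str.lower p == "no"
def pvHitSinger (p : String) : Bool :=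
  PySem.Str.lower p == "singer" || PySem.Str.lower p == "not_singer"
def pvHitDancer (p : String) : Bool :=
  PySem.Str.lower p == "dancer" || PySem.Str.lower p == "not_dancer"
def pvHitName (p : String) : Bool :=
  !pvHitCond p && !pvHitSinger p && !pvHitDancer p

def extract_keyword_constant_alt (input_string : String) : String × String × String × String :=
  let parts := PySem.Str.split₀ (PySem.Str.strip input_string)
  let condition := ((parts.reverse.find? pvHitCond).map PySem.Str.lower).getD ""
  let singer := ((parts.reverse.find? pvHitSinger).map PySem.Str.lower).getD ""
  let dancer := (parts.reverse.find? pvHitDancer).getD ""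
  let name := (parts.reverse.find? pvHitName).getD ""
  (condition, singer, dancer, name)

-- ===== PRECONDITION & SPEC =====
def Spec_extract_keyword_constant (input_string : String) (out : String × String × String × String) : Prop := out = extract_keyword_constant_alt input_string
instance (input_string : String) (out : String × String × String × String) : Decidable (Spec_extract_keyword_constant input_string out) := by unfold Spec_extract_keyword_constant; infer_instance

-- ===== CLAIM (what is proved, stated in full; the proofs are below) =====
def Claim_equal_extract_keyword_constant : Prop := ∀ (input_string : String), Dom_extract_keyword_constant input_string → Spec_extract_keyword_constant input_string (extract_keyword_constant input_string)

-- ===== LEMMAS AND PROOFS =====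

-- loop invariant: A's fold computes, per field, the last matching token (or the initial value)
theorem pv_fold_eq_find (l : List String) (init : String × String × String × String) :
    l.foldl pvStepA init =
      ( ((l.reverse.find? pvHitCond).map PySem.Str.lower).getD init.1,
        ((l.reverse.find? pvHitSinger).map PySem.Str.lower).getD init.2.1,
        (l.reverse.find? pvHitDancer).getD init.2.2.1,
        (l.reverse.find? pvHitName).getD init.2.2.2 ) := by
  induction l using List.reverseRecOn generalizing init with
  | nil => simp
  | append_singleton l p ih =>
      rw [List.foldl_append, List.foldl_cons, List.foldl_nil, ih]
      rw [List.reverse_append]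
      simp only [List.reverse_singleton, List.singleton_append, List.find?_cons]
      by_cases h1 : pvHitCond p = true
      · have h2 : pvHitSinger p = false := by
          simp only [pvHitCond, Bool.or_eq_true, beq_iff_eq] at h1
          simp only [pvHitSinger, Bool.or_eq_false_iff, beq_eq_false_iff_ne]
          rcases h1 with h | h <;> rw [h] <;> exact ⟨by decide, by decide⟩
        have h3 : pvHitDancer p = false := by
          simp only [pvHitCond, Bool.or_eq_true, beq_iff_eq] at h1
          simp only [pvHitDancer, Bool.or_eq_false_iff, beq_eq_false_iff_ne]
          rcases h1 with h | h <;> rw [h] <;> exact ⟨by decide, by decide⟩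
        have h4 : pvHitName p = false := by simp [pvHitName, h1]
        have hs : (PySem.Str.lower p == "yes" || PySem.Str.lower p == "no") = true := h1
        simp [pvStepA, hs, h1, h2, h3, h4]
      · by_cases h2 : pvHitSinger p = true
        · have h3 : pvHitDancer p = false := by
            simp only [pvHitSinger, Bool.or_eq_true, beq_iff_eq] at h2
            simp only [pvHitDancer, Bool.or_eq_false_iff, beq_eq_false_iff_ne]
            rcases h2 with h | h <;> rw [h] <;> exact ⟨by decide, by decide⟩
          have h4 : pvHitName p = false := by simp [pvHitName, h2]
          have hc : (PySem.Str.lower p == "yes" || PySem.Str.lower p == "no") = false := by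
            simpa [pvHitCond] using h1
          have hs : (PySem.Str.lower p == "singer" || PySem.Str.lower p == "not_singer") = true := h2
          simp [pvStepA, hc, hs, h1, h2, h3, h4]
        · by_cases h3 : pvHitDancer p = true
          · have h4 : pvHitName p = false := by simp [pvHitName, h3]
            have hc : (PySem.Str.lower p == "yes" || PySem.Str.lower p == "no") = false := by
              simpa [pvHitCond] using h1
            have hs : (PySem.Str.lower p == "singer" || PySem.Str.lower p == "not_singer") = false := by
              simpa [pvHitSinger] using h2
            have hd : (PySem.Str.lower p == "dancer" || PySem.Str.lower p == "not_dancer") = true := h3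
            simp [pvStepA, hc, hs, hd, h1, h2, h3, h4]
          · have h4 : pvHitName p = true := by
              simp only [pvHitName, Bool.and_eq_true, Bool.not_eq_true']
              exact ⟨⟨by simpa using h1, by simpa using h2⟩, by simpa using h3⟩
            have hc : (PySem.Str.lower p == "yes" || PySem.Str.lower p == "no") = false := by
              simpa [pvHitCond] using h1
            have hs : (PySem.Str.lower p == "singer" || PySem.Str.lower p == "not_singer") = false := by
              simpa [pvHitSinger] using h2
            have hd : (PySem.Str.lower p == "dancer" || PySem.Str.lower p == "not_dancer") = false := by
              simpa [pvHitDancer] using h3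
            simp [pvStepA, hc, hs, hd, h1, h2, h3, h4]

-- ===== VERDICT (by name: the statement is the Claim_ definition above) =====
theorem extract_keyword_constant_spec : Claim_equal_extract_keyword_constant := by
  intro s _
  unfold Spec_extract_keyword_constant extract_keyword_constant extract_keyword_constant_alt
  exact pv_fold_eq_find _ _
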